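-- pv_equiv track=rewrite | github.com/Anindith-Ram/ONNX-Graph-Surgery-System | knowledge_base/llm_context_generator.py | _generate_transformation_order
-- ===== SOURCE A (Python) =====
-- from typing import Dict, List, Any, Optional, Tuple
--
-- def _generate_transformation_order(blockers: List[Dict]) -> str:
--     """Generate recommended transformation order."""
--     content = []
--
--     # Group by severity/type
--     priority_map = {
--         'Loop': 1,
--         'If': 1,
--         'Scan': 1,
--         'Einsum': 2,
--         'Where': 2,
--         'NonZero': 2,
--         'NonMaxSuppression': 3,
--         'GatherND': 4,
--         'ScatterND': 4,
--     }
--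
--     # Sort blockers by priority
--     sorted_blockers = sorted(
--         blockers,
--         key=lambda b: priority_map.get(b.get('op_type', ''), 5)
--     )
--
--     content.append("Transform in this order for best results:")
--     content.append("")
--
--     seen_types = set()
--     for i, b in enumerate(sorted_blockers, 1):
--         op_type = b.get('op_type', 'Unknown')
--         if op_type not in seen_types:
--             content.append(f"{i}. **{op_type}** - {b.get('reason', '')[:50]}...")
--             seen_types.add(op_type)
--
--     return "\n".join(content)
-- ===== SOURCE B (Python) =====
-- def _generate_transformation_order(blockers):
--     """Generate recommended transformation order."""
--     priority_map = {
--         'Loop': 1,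
--         'If': 1,
--         'Scan': 1,
--         'Einsum': 2,
--         'Where': 2,
--         'NonZero': 2,
--         'NonMaxSuppression': 3,
--         'GatherND': 4,
--         'ScatterND': 4,
--     }
--
--     # Stable bucket distribution over the fixed priority range 1..5
--     # (replaces the comparison sort; within-priority original order is kept).
--     buckets = {p: [] for p in range(1, 6)}
--     for b in blockers:
--         buckets[priority_map.get(b.get('op_type', ''), 5)].append(b)
--
--     content = ["Transform in this order for best results:", ""]
--     seen_types = set()
--     i = 0
--     for p in range(1, 6):
--         for b in buckets[p]:
--             i += 1
--             op_type = b.get('op_type', 'Unknown')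
--             if op_type not in seen_types:
--                 content.append(f"{i}. **{op_type}** - {b.get('reason', '')[:50]}...")
--                 seen_types.add(op_type)
--
--     return "\n".join(content)
-- ===== Notes on version B (the rewrite author's own statement) =====
-- stated objective: alternative
-- what changed: Replaces the comparison sort with a single-pass stable bucket distribution over the fixed priority range 1..5 (dict of lists, concatenated in priority order), and replaces enumerate over the sorted list by nested bucket loops with an explicit running counter.
import Mathlib
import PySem

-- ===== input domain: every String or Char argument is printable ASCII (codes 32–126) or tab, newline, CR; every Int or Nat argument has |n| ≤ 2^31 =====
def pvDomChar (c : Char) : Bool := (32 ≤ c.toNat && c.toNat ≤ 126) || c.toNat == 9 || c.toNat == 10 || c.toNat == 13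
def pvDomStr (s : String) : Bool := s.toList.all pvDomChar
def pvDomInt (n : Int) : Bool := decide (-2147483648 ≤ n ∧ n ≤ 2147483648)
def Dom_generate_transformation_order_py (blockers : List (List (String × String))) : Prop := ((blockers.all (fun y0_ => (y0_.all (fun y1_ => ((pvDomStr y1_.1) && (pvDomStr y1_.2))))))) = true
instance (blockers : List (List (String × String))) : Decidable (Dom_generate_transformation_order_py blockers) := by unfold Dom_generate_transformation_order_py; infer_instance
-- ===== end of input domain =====

-- B replaces sorted() by a stable bucket distribution over the fixed priority range 1..5 and
-- the enumerate loop by nested bucket loops with a running counter; same output, similar cost.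

-- shared helpers (the same literal dict and f-string expressions appear in both Pythons)
def pvPriorityMap : PySem.Dict String Int :=
  PySem.Dict.ofList [("Loop", 1), ("If", 1), ("Scan", 1), ("Einsum", 2), ("Where", 2),
    ("NonZero", 2), ("NonMaxSuppression", 3), ("GatherND", 4), ("ScatterND", 4)]

-- priority_map.get(b.get('op_type', ''), 5)
def pvPrio (b : List (String × String)) : Int :=
  PySem.Dict.getD pvPriorityMap (PySem.Dict.getD (PySem.Dict.mk b) "op_type" "") 5

-- f"{i}. **{op_type}** - {b.get('reason', '')[:50]}..."
def pvLine (i : Int) (b : List (String × String)) : String :=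
  PySem.Int.toStr i ++ ". **" ++ PySem.Dict.getD (PySem.Dict.mk b) "op_type" "Unknown" ++ "** - " ++
    PySem.Str.slice (PySem.Dict.getD (PySem.Dict.mk b) "reason" "") none (some 50) ++ "..."

-- ===== PORT A =====
-- the body of A's 'for i, b in enumerate(sorted_blockers, 1)' loop, state (content, seen_types)
def pvStepA (st : List String × PySem.Set String) (p : Int × List (String × String)) :
    List String × PySem.Set String :=
  let op := PySem.Dict.getD (PySem.Dict.mk p.2) "op_type" "Unknown"
  if PySem.Set.contains st.2 op then st
  else (st.1 ++ [pvLine p.1 p.2], PySem.Set.add st.2 op)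

def generate_transformation_order_py (blockers : List (List (String × String))) : String :=
  let content : List String := ["Transform in this order for best results:", ""]
  let sorted_blockers := PySem.List.sorted blockers (fun b => pvPrio b) false
  let st := (PySem.List.enumerate sorted_blockers 1).foldl pvStepA (content, PySem.Set.empty)
  PySem.Str.join "\n" st.1

-- ===== PORT B =====
-- the body of B's inner 'for b in buckets[p]' loop, state (i, (content, seen_types))
def pvStepB (st : Int × List String × PySem.Set String) (b : List (String × String)) :
    Int × List String × PySem.Set String :=
  let i := st.1 + 1
  let op := PySem.Dict.getD (PySem.Dict.mk b) "op_type" "Unknown"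
  if PySem.Set.contains st.2.2 op then (i, st.2.1, st.2.2)
  else (i, st.2.1 ++ [pvLine i b], PySem.Set.add st.2.2 op)

def generate_transformation_order_py_alt (blockers : List (List (String × String))) : String :=
  let buckets0 : PySem.Dict Int (List (List (String × String))) :=
    PySem.Dict.ofList [(1, []), (2, []), (3, []), (4, []), (5, [])]
  let buckets := blockers.foldl (fun d b => PySem.Dict.modify d (pvPrio b) [] (· ++ [b])) buckets0
  let st := (PySem.List.pyRange 1 6 1).foldl
    (fun st p => (PySem.Dict.getD buckets p []).foldl pvStepB st)
    ((0 : Int), (["Transform in this order for best results:", ""] : List String),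
      (PySem.Set.empty : PySem.Set String))
  PySem.Str.join "\n" st.2.1

-- ===== PRECONDITION & SPEC =====
def Spec_generate_transformation_order_py (blockers : List (List (String × String))) (out : String) : Prop := out = generate_transformation_order_py_alt blockers
instance (blockers : List (List (String × String))) (out : String) : Decidable (Spec_generate_transformation_order_py blockers out) := by unfold Spec_generate_transformation_order_py; infer_instance

-- ===== CLAIM (what is proved, stated in full; the proofs are below) =====
def Claim_equal_generate_transformation_order_py : Prop := ∀ (blockers : List (List (String × String))), Dom_generate_transformation_order_py blockers → Spec_generate_transformation_order_py blockers (generate_transformation_order_py blockers)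

-- ===== LEMMAS AND PROOFS =====

theorem pvPriorityMap_eq : pvPriorityMap = PySem.Dict.mk [("Loop", 1), ("If", 1), ("Scan", 1),
    ("Einsum", 2), ("Where", 2), ("NonZero", 2), ("NonMaxSuppression", 3), ("GatherND", 4),
    ("ScatterND", 4)] := rfl

theorem pvPrio_bounds_aux (s : String) :
    1 ≤ PySem.Dict.getD pvPriorityMap s 5 ∧ PySem.Dict.getD pvPriorityMap s 5 ≤ 5 := by
  rw [pvPriorityMap_eq]
  simp [PySem.Dict.getD, PySem.Dict.get?_mk_cons]
  split_ifs <;> exact ⟨of_decide_eq_true rfl, of_decide_eq_true rfl⟩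

-- every priority is between 1 and 5
theorem pvPrio_bounds (b : List (String × String)) : 1 ≤ pvPrio b ∧ pvPrio b ≤ 5 := by
  unfold pvPrio
  exact pvPrio_bounds_aux _

-- the five buckets, in order
def pvPart (xs : List (List (String × String))) : List (List (String × String)) :=
  xs.filter (fun b => pvPrio b == 1) ++ xs.filter (fun b => pvPrio b == 2) ++
  xs.filter (fun b => pvPrio b == 3) ++ xs.filter (fun b => pvPrio b == 4) ++
  xs.filter (fun b => pvPrio b == 5)

theorem pvPrio_of_mem_filter {xs : List (List (String × String))} {i : Int}
    {y : List (String × String)} (h : y ∈ xs.filter (fun b => pvPrio b == i)) : pvPrio y = i := by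
  have := (List.mem_filter.mp h).2
  simpa using this

theorem pv_insertBy_all_before {α : Type} (before : α → α → Bool) (x : α) (zs : List α)
    (h : ∀ z ∈ zs, before x z = true) : PySem.List.insertBy before x zs = x :: zs := by
  cases zs with
  | nil => rfl
  | cons z zs => simp [PySem.List.insertBy, h z (by simp)]

theorem pv_insertBy_append {α : Type} (before : α → α → Bool) (x : α) (ys zs : List α)
    (h : ∀ y ∈ ys, before x y = false) :
    PySem.List.insertBy before x (ys ++ zs) = ys ++ PySem.List.insertBy before x zs := by
  induction ys with
  | nil => rfl
  | cons y ys ih =>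
      simp only [List.cons_append, PySem.List.insertBy, h y (by simp)]
      simp only [Bool.false_eq_true, if_false, List.cons.injEq, true_and]
      exact ih (fun y hy => h y (by simp [hy]))

theorem pv_insert_mid (x : List (String × String)) (A B : List (List (String × String)))
    (hA : ∀ y ∈ A, ¬ (pvPrio x < pvPrio y)) (hB : ∀ y ∈ B, pvPrio x < pvPrio y) :
    PySem.List.insertBy (fun a b => decide (pvPrio a < pvPrio b)) x (A ++ B) = A ++ x :: B := by
  rw [pv_insertBy_append _ _ _ _ (fun y hy => by simp [hA y hy]),
      pv_insertBy_all_before _ _ _ (fun z hz => by simp [hB z hz])]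

-- the stable sort by priority is the concatenation of the buckets
theorem pv_sorted_eq_part (xs : List (List (String × String))) :
    PySem.List.sorted xs (fun b => pvPrio b) false = pvPart xs := by
  rw [PySem.List.sorted_eq_foldl_insertBy]
  induction xs using List.reverseRecOn with
  | nil => rfl
  | append_singleton l x ih =>
      rw [List.foldl_append, List.foldl_cons, List.foldl_nil, ih]
      obtain ⟨h1, h5⟩ := pvPrio_bounds x
      unfold pvPart
      simp only [List.filter_append, List.filter_cons, List.filter_nil]
      interval_cases hx : pvPrio x <;> simp only [List.append_assoc]
      · rw [pv_insert_mid x (l.filter (fun b => pvPrio b == 1))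
            (l.filter (fun b => pvPrio b == 2) ++ (l.filter (fun b => pvPrio b == 3) ++
              (l.filter (fun b => pvPrio b == 4) ++ l.filter (fun b => pvPrio b == 5)))) (by
            intro y hy
            rw [pvPrio_of_mem_filter hy]; omega) (by
            intro y hy
            rcases List.mem_append.mp hy with h | h
            · rw [pvPrio_of_mem_filter h]; omega
            rcases List.mem_append.mp h with h | h
            · rw [pvPrio_of_mem_filter h]; omega
            rcases List.mem_append.mp h with h | h <;> rw [pvPrio_of_mem_filter h] <;> omega)]
        simp
      · rw [show (l.filter (fun b => pvPrio b == 1) ++ (l.filter (fun b => pvPrio b == 2) ++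
            (l.filter (fun b => pvPrio b == 3) ++ (l.filter (fun b => pvPrio b == 4) ++
            l.filter (fun b => pvPrio b == 5))))) = (l.filter (fun b => pvPrio b == 1) ++
            l.filter (fun b => pvPrio b == 2)) ++
            (l.filter (fun b => pvPrio b == 3) ++ (l.filter (fun b => pvPrio b == 4) ++
            l.filter (fun b => pvPrio b == 5))) from by simp,
          pv_insert_mid x _ _ (by
            intro y hy
            rcases List.mem_append.mp hy with h | h <;> rw [pvPrio_of_mem_filter h] <;> omega) (by
            intro y hy
            rcases List.mem_append.mp hy with h | h
            · rw [pvPrio_of_mem_filter h]; omega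
            rcases List.mem_append.mp h with h | h <;> rw [pvPrio_of_mem_filter h] <;> omega)]
        simp
      · rw [show (l.filter (fun b => pvPrio b == 1) ++ (l.filter (fun b => pvPrio b == 2) ++
            (l.filter (fun b => pvPrio b == 3) ++ (l.filter (fun b => pvPrio b == 4) ++
            l.filter (fun b => pvPrio b == 5))))) = (l.filter (fun b => pvPrio b == 1) ++
            (l.filter (fun b => pvPrio b == 2) ++ l.filter (fun b => pvPrio b == 3))) ++
            (l.filter (fun b => pvPrio b == 4) ++ l.filter (fun b => pvPrio b == 5)) from by simp,
          pv_insert_mid x _ _ (by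
            intro y hy
            rcases List.mem_append.mp hy with h | h
            · rw [pvPrio_of_mem_filter h]; omega
            rcases List.mem_append.mp h with h | h <;> rw [pvPrio_of_mem_filter h] <;> omega) (by
            intro y hy
            rcases List.mem_append.mp hy with h | h <;> rw [pvPrio_of_mem_filter h] <;> omega)]
        simp
      · rw [show (l.filter (fun b => pvPrio b == 1) ++ (l.filter (fun b => pvPrio b == 2) ++
            (l.filter (fun b => pvPrio b == 3) ++ (l.filter (fun b => pvPrio b == 4) ++
            l.filter (fun b => pvPrio b == 5))))) = (l.filter (fun b => pvPrio b == 1) ++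
            (l.filter (fun b => pvPrio b == 2) ++ (l.filter (fun b => pvPrio b == 3) ++
            l.filter (fun b => pvPrio b == 4)))) ++ l.filter (fun b => pvPrio b == 5) from by simp,
          pv_insert_mid x _ _ (by
            intro y hy
            rcases List.mem_append.mp hy with h | h
            · rw [pvPrio_of_mem_filter h]; omega
            rcases List.mem_append.mp h with h | h
            · rw [pvPrio_of_mem_filter h]; omega
            rcases List.mem_append.mp h with h | h <;> rw [pvPrio_of_mem_filter h] <;> omega) (by
            intro y hy
            rw [pvPrio_of_mem_filter hy]; omega)]
        simp
      · rw [show (l.filter (fun b => pvPrio b == 1) ++ (l.filter (fun b => pvPrio b == 2) ++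
            (l.filter (fun b => pvPrio b == 3) ++ (l.filter (fun b => pvPrio b == 4) ++
            l.filter (fun b => pvPrio b == 5))))) = (l.filter (fun b => pvPrio b == 1) ++
            (l.filter (fun b => pvPrio b == 2) ++ (l.filter (fun b => pvPrio b == 3) ++
            (l.filter (fun b => pvPrio b == 4) ++ l.filter (fun b => pvPrio b == 5))))) ++ []
            from by simp,
          pv_insert_mid x _ _ (by
            intro y hy
            rcases List.mem_append.mp hy with h | h
            · rw [pvPrio_of_mem_filter h]; omega
            rcases List.mem_append.mp h with h | h
            · rw [pvPrio_of_mem_filter h]; omega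
            rcases List.mem_append.mp h with h | h
            · rw [pvPrio_of_mem_filter h]; omega
            rcases List.mem_append.mp h with h | h <;> rw [pvPrio_of_mem_filter h] <;> omega)
            (by intro y hy; simp at hy)]
        simp

-- one step of B's inner loop is one step of A's loop, with the counter tracked
theorem pv_step (i : Int) (LS : List String × PySem.Set String) (b : List (String × String)) :
    pvStepB (i, LS) b = (i + 1, pvStepA LS (i + 1, b)) := by
  by_cases h : PySem.Dict.getD (PySem.Dict.mk b) "op_type" "Unknown" ∈ LS.2 <;>
    simp [pvStepB, pvStepA, h]

-- B's inner loop over a chunk is A's loop over the enumerated chunk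
theorem pv_inner (c : List (List (String × String))) (i : Int)
    (LS : List String × PySem.Set String) :
    c.foldl pvStepB (i, LS) =
      (i + c.length, (PySem.List.enumerate c (i + 1)).foldl pvStepA LS) := by
  induction c generalizing i LS with
  | nil => simp [PySem.List.enumerate_nil]
  | cons b c ih =>
      rw [List.foldl_cons, pv_step, ih, PySem.List.enumerate_cons, List.foldl_cons]
      have h1 : i + 1 + (c.length : Int) = i + ((b :: c).length : Int) := by
        simp; omega
      rw [h1]

-- B's sequence of inner loops is A's single loop over the concatenation
theorem pv_chunks (cs : List (List (List (String × String)))) (i : Int)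
    (LS : List String × PySem.Set String) :
    cs.foldl (fun st c => c.foldl pvStepB st) (i, LS) =
      (i + (cs.map List.length).sum,
        (PySem.List.enumerate cs.flatten (i + 1)).foldl pvStepA LS) := by
  induction cs generalizing i LS with
  | nil => simp [PySem.List.enumerate_nil]
  | cons c cs ih =>
      rw [List.foldl_cons, pv_inner, ih, List.flatten_cons, PySem.List.enumerate_append,
        List.foldl_append]
      have h1 : i + (c.length : Int) + ((cs.map List.length).sum : Int) =
          i + (((c :: cs).map List.length).sum : Int) := by
        simp; ring
      have h2 : i + (c.length : Int) + 1 = i + 1 + (c.length : Int) := by ring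
      rw [h1, h2]

-- the bucket dict holds exactly the filters
theorem pv_buckets_getD (blockers : List (List (String × String))) (c : Int) :
    PySem.Dict.getD
      (blockers.foldl (fun d b => PySem.Dict.modify d (pvPrio b) [] (· ++ [b]))
        (PySem.Dict.ofList [(1, []), (2, []), (3, []), (4, []), (5, [])])) c [] =
      blockers.filter (fun b => pvPrio b == c) := by
  have hm : blockers.foldl (fun d b => PySem.Dict.modify d (pvPrio b) [] (· ++ [b]))
      (PySem.Dict.ofList [(1, []), (2, []), (3, []), (4, []), (5, [])]) =
      (blockers.map (fun b => (pvPrio b, b))).foldl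
        (fun d p => PySem.Dict.modify d p.1 [] (· ++ [p.2]))
        (PySem.Dict.ofList [(1, []), (2, []), (3, []), (4, []), (5, [])]) := by
    rw [List.foldl_map]
  rw [hm, PySem.Dict.getD_foldl_modify_append]
  have h0 : PySem.Dict.getD
      (PySem.Dict.ofList [((1 : Int), ([] : List (List (String × String)))), (2, []), (3, []),
        (4, []), (5, [])]) c [] = [] := by
    rw [show PySem.Dict.ofList [((1 : Int), ([] : List (List (String × String)))), (2, []), (3, []),
        (4, []), (5, [])] = PySem.Dict.mk [(1, []), (2, []), (3, []), (4, []), (5, [])] from rfl]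
    simp [PySem.Dict.getD, PySem.Dict.get?_mk_cons]
    split_ifs <;> rfl
  rw [h0, List.filter_map]
  simp [Function.comp_def]

theorem generate_transformation_order_py_spec : Claim_equal_generate_transformation_order_py := by
  unfold Claim_equal_generate_transformation_order_py
  intro blockers _
  unfold Spec_generate_transformation_order_py
  unfold generate_transformation_order_py generate_transformation_order_py_alt
  simp only []
  rw [pv_sorted_eq_part]
  have hrange : PySem.List.pyRange 1 6 1 = [1, 2, 3, 4, 5] := rfl
  rw [hrange]
  have hmap : ([1, 2, 3, 4, 5] : List Int).foldl
      (fun st p => (PySem.Dict.getD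
        (blockers.foldl (fun d b => PySem.Dict.modify d (pvPrio b) [] (· ++ [b]))
          (PySem.Dict.ofList [(1, []), (2, []), (3, []), (4, []), (5, [])])) p []).foldl pvStepB st)
      ((0 : Int), (["Transform in this order for best results:", ""] : List String),
        (PySem.Set.empty : PySem.Set String)) =
      ([blockers.filter (fun b => pvPrio b == 1), blockers.filter (fun b => pvPrio b == 2),
        blockers.filter (fun b => pvPrio b == 3), blockers.filter (fun b => pvPrio b == 4),
        blockers.filter (fun b => pvPrio b == 5)]).foldl
        (fun st c => c.foldl pvStepB st)
      ((0 : Int), (["Transform in this order for best results:", ""] : List String),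
        (PySem.Set.empty : PySem.Set String)) := by
    simp only [List.foldl_cons, List.foldl_nil, pv_buckets_getD]
  rw [hmap, pv_chunks]
  simp [pvPart]
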